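-- pv_equiv track=rewrite | github.com/Genesis-Embodied-AI/Genesis | tests/test_rigid_physics_analytical_vs_gjk.py | insert_errno_before_call
-- ===== SOURCE A (Python) =====
-- def insert_errno_before_call(lines, function_call_pattern, errno_value, comment):
--     """Insert errno marker before every occurrence of a function call.
--
--     Handles the case where the call is on a continuation line (e.g. after
--     ``result = (\\n    func(...)``).  Walks backwards to find the statement
--     start and inserts the errno line before it.
--     """
--     call_line_indices = []
--     for i, line in enumerate(lines):
--         if function_call_pattern in line:
--             idx = line.find(function_call_pattern)
--             if idx != -1:
--                 if idx == 0 or not (line[idx - 1].isalnum() or line[idx - 1] == "_"):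
--                     call_line_indices.append(i)
--
--     if not call_line_indices:
--         raise ValueError(f"Could not find function call: {function_call_pattern}")
--
--     offset = 0
--     for call_line_idx in call_line_indices:
--         call_line_idx += offset
--
--         insert_idx = call_line_idx
--         paren_depth = 0
--         for j in range(call_line_idx - 1, -1, -1):
--             for ch in lines[j]:
--                 if ch == "(":
--                     paren_depth += 1
--                 elif ch == ")":
--                     paren_depth -= 1
--             if paren_depth > 0:
--                 insert_idx = j
--             break
--
--         indent_size = len(lines[insert_idx]) - len(lines[insert_idx].lstrip())
--         errno_line = f"{' ' * indent_size}errno[i_b] |= {errno_value}  # {comment}"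
--         lines.insert(insert_idx, errno_line)
--         offset += 1
--
--     return lines
-- ===== SOURCE B (Python) =====
-- def _balance(s):
--     return sum((c == "(") - (c == ")") for c in s)
--
--
-- def insert_errno_before_call(lines, function_call_pattern, errno_value, comment):
--     """Two-pass rewrite: record each call's insert target in the original list,
--     then build a fresh output list, emitting one marker per recorded target
--     just before the target line.  Does not mutate ``lines``."""
--     targets = []
--     for i, line in enumerate(lines):
--         idx = line.find(function_call_pattern)
--         if idx != -1 and (idx == 0 or not (line[idx - 1].isalnum() or line[idx - 1] == "_")):
--             if i > 0 and _balance(lines[i - 1]) > 0: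
--                 targets.append(i - 1)
--             else:
--                 targets.append(i)
--
--     if not targets:
--         raise ValueError(f"Could not find function call: {function_call_pattern}")
--
--     out = []
--     for k, line in enumerate(lines):
--         n = targets.count(k)
--         if n:
--             indent = " " * (len(line) - len(line.lstrip()))
--             out.extend([f"{indent}errno[i_b] |= {errno_value}  # {comment}"] * n)
--         out.append(line)
--     return out
-- ===== Notes on version B (the rewrite author's own statement) =====
-- stated objective: simpler
-- what changed: A repeatedly mutates the list in place, tracking an insertion offset and re-reading the already-mutated list for the backwards paren scan and the indentation; B is a two-pass rewrite over the original list: pass one records each call's insert target index, pass two rebuilds the output, emitting one marker per recorded target in front of each line.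
import Mathlib
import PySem

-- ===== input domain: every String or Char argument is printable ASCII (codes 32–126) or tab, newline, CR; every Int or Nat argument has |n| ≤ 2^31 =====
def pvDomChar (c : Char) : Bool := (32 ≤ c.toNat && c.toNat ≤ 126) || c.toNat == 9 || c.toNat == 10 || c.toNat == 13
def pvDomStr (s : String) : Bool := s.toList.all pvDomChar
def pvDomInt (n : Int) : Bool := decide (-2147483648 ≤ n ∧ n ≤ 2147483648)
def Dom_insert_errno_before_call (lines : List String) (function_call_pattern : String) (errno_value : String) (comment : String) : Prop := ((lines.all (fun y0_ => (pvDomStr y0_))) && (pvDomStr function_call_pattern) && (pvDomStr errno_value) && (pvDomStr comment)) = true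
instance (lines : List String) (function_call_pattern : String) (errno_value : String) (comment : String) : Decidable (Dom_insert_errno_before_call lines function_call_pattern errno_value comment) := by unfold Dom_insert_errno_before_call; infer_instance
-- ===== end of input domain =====

-- B replaces A's mutating offset-tracking insertion loop (with its backwards paren scan over the
-- mutated list) by a two-pass rewrite over the ORIGINAL list: record each call's insert target,
-- then weave the markers in while rebuilding the output (objective: simpler). Python A mutates
-- `lines` in place; B does not — the equivalence proved here is about the RETURN value only.

-- ===== PORT A =====
-- word-boundary hit test of A (the `if pattern in line` / `line.find` / preceding-char check)
def pvHitA (function_call_pattern line : String) : Bool :=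
  if PySem.Str.isIn function_call_pattern line then
    let idx := PySem.Str.find line function_call_pattern
    if idx ≠ -1 then
      if idx = 0 then true
      else
        -- line[idx-1].isalnum() or line[idx-1] == "_"  (idx ≥ 1 here, so pyGet? is some)
        !(match PySem.Str.pyGet? line (idx - 1) with
          | some c => PySem.Chars.isalnum c || c == '_'
          | none => false)
    else false
  else false

-- the body of A's insertion loop over call_line_indices (state: mutated lines × offset).
-- The backwards `for j in range(call_line_idx-1, -1, -1)` loop breaks unconditionally after its
-- first iteration, so it runs exactly once when the range is nonempty (call_line_idx - 1 ≥ 0).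
def pvFoldA (errno_value comment : String) (st : List String × Int) (cc : Int) : List String × Int :=
  let cur := st.1
  let call_line_idx := cc + st.2
  let insert_idx :=
    if 0 ≤ call_line_idx - 1 then
      let j := call_line_idx - 1
      let paren_depth :=
        (PySem.List.pyGetD cur j "").toList.foldl
          (fun d ch => if ch == '(' then d + 1 else if ch == ')' then d - 1 else d) (0 : Int)
      if paren_depth > 0 then j else call_line_idx
    else call_line_idx
  let tline := PySem.List.pyGetD cur insert_idx ""
  let indent_size := PySem.Str.len tline - PySem.Str.len (PySem.Str.lstrip tline)
  let errno_line := String.ofList (List.replicate indent_size.toNat ' ' ++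
    String.toList "errno[i_b] |= " ++ errno_value.toList ++ String.toList "  # " ++ comment.toList)
  (PySem.List.insert cur insert_idx errno_line, st.2 + 1)

def insert_errno_before_call (lines : List String) (function_call_pattern : String) (errno_value : String) (comment : String) : List String :=
  let call_line_indices : List Int :=
    (PySem.List.enumerate lines 0).foldl
      (fun acc p => if pvHitA function_call_pattern p.2 then acc ++ [p.1] else acc) []
  -- (if call_line_indices = [] Python raises ValueError: excluded by Pre_; the fold is a no-op there)
  (call_line_indices.foldl (pvFoldA errno_value comment) (lines, (0 : Int))).1

-- ===== PORT B =====
-- net paren balance of a line (Source B's _balance: sum of ±1 per char)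
def pvBalB (s : String) : Int :=
  (s.toList.map (fun c => (if c == '(' then (1 : Int) else 0) - (if c == ')' then (1 : Int) else 0))).sum

-- word-boundary hit test of B (single boolean expression in Source B)
def pvHitB (function_call_pattern line : String) : Bool :=
  let idx := PySem.Str.find line function_call_pattern
  idx != -1 && (idx == 0 || !(match PySem.Str.pyGet? line (idx - 1) with
    | some c => PySem.Chars.isalnum c || c == '_'
    | none => false))

-- the body of B's output-building loop: emit one marker per target equal to this index, then the line
def pvFoldB (errno_value comment : String) (targets : List Int) (out : List String) (p : Int × String) : List String :=
  let n := PySem.List.count targets p.1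
  let out := if n ≠ 0 then
      out ++ List.replicate n (String.ofList (List.replicate (PySem.Str.len p.2 - PySem.Str.len (PySem.Str.lstrip p.2)).toNat ' ' ++
        String.toList "errno[i_b] |= " ++ errno_value.toList ++ String.toList "  # " ++ comment.toList))
    else out
  out ++ [p.2]

def insert_errno_before_call_alt (lines : List String) (function_call_pattern : String) (errno_value : String) (comment : String) : List String :=
  let targets : List Int :=
    (PySem.List.enumerate lines 0).foldl
      (fun acc p =>
        if pvHitB function_call_pattern p.2 then
          acc ++ [if 0 < p.1 ∧ 0 < pvBalB (PySem.List.pyGetD lines (p.1 - 1) "") then p.1 - 1 else p.1]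
        else acc) []
  -- (if targets = [] Python raises ValueError: excluded by Pre_)
  (PySem.List.enumerate lines 0).foldl (pvFoldB errno_value comment targets) []

-- ===== PRECONDITION & SPEC =====
-- independent per-line pattern test for the precondition (find ≠ -1 at a word boundary)
def pvPreHit (pat line : String) : Bool :=
  let idx := PySem.Str.find line pat
  idx != -1 && (idx == 0 || !(match PySem.Str.pyGet? line (idx - 1) with
    | some c => PySem.Chars.isalnum c || c == '_'
    | none => false))

-- Pre_ excludes exactly the inputs where no line contains the pattern at a word boundary:
-- there Python A (and B) raise ValueError("Could not find function call: ...").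
def Pre_insert_errno_before_call (lines : List String) (function_call_pattern : String) (errno_value : String) (comment : String) : Prop :=
  lines.any (fun l => pvPreHit function_call_pattern l) = true
instance (lines : List String) (function_call_pattern : String) (errno_value : String) (comment : String) : Decidable (Pre_insert_errno_before_call lines function_call_pattern errno_value comment) := by unfold Pre_insert_errno_before_call; infer_instance

def pvWitness_insert_errno_before_call : List String × String × String × String :=
  (["x = (", "    f(1)", "f(2)"], "f(", "gs.ERR", "call site")

def Spec_insert_errno_before_call (lines : List String) (function_call_pattern : String) (errno_value : String) (comment : String) (out : List String) : Prop := out = insert_errno_before_call_alt lines function_call_pattern errno_value comment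
instance (lines : List String) (function_call_pattern : String) (errno_value : String) (comment : String) (out : List String) : Decidable (Spec_insert_errno_before_call lines function_call_pattern errno_value comment out) := by unfold Spec_insert_errno_before_call; infer_instance

-- ===== CLAIM (what is proved, stated in full; the proofs are below) =====
def Claim_equal_insert_errno_before_call : Prop := ∀ (lines : List String) (function_call_pattern : String) (errno_value : String) (comment : String), Dom_insert_errno_before_call lines function_call_pattern errno_value comment → Pre_insert_errno_before_call lines function_call_pattern errno_value comment → Spec_insert_errno_before_call lines function_call_pattern errno_value comment (insert_errno_before_call lines function_call_pattern errno_value comment)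

-- ===== LEMMAS AND PROOFS =====

-- the errno marker line, indented to match line s
def pvMk (errno_value comment s : String) : String :=
  String.ofList (List.replicate (PySem.Str.len s - PySem.Str.len (PySem.Str.lstrip s)).toNat ' ' ++
    String.toList "errno[i_b] |= " ++ errno_value.toList ++ String.toList "  # " ++ comment.toList)

-- reference result: weave one marker per recorded target in front of each line
def pvWv (ev cm : String) : List String → List Int → Int → List String
  | [], _, _ => []
  | l :: rest, ts, k => List.replicate (List.count k ts) (pvMk ev cm l) ++ l :: pvWv ev cm rest ts (k + 1)

-- the insert target of a call on line i, read off the ORIGINAL lines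
def pvTgt (lines : List String) (i : Int) : Int :=
  if 0 < i ∧ 0 < pvBalB (PySem.List.pyGetD lines (i - 1) "") then i - 1 else i

theorem pvHit_eq (pat line : String) : pvHitA pat line = pvHitB pat line := by
  unfold pvHitA pvHitB
  by_cases h : PySem.Str.isIn pat line = true
  · have hf : PySem.Str.find line pat ≠ -1 := by
      rw [PySem.Str.find_ne_neg_one_iff]; exact (PySem.Str.isIn_iff_infix _ _).mp h
    simp only [PySem.Str.find_eq, PySem.Str.isIn_eq] at h hf
    have h1 : (PySem.Chars.find line.toList pat.toList != -1) = true := by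
      simpa [bne_iff_ne] using hf
    by_cases h0 : PySem.Chars.find line.toList pat.toList = 0
    · simp [h, hf, h0]
    · have h2 : (PySem.Chars.find line.toList pat.toList == 0) = false := by
        simpa [beq_iff_eq] using h0
      simp [h, hf, h0, h1, h2]
  · have hf : PySem.Str.find line pat = -1 := by
      by_contra hc
      exact h ((PySem.Str.isIn_iff_infix _ _).mpr ((PySem.Str.find_ne_neg_one_iff _ _).mp hc))
    simp only [PySem.Str.find_eq, PySem.Str.isIn_eq] at hf ⊢
    simp [h, hf, bne_iff_ne, beq_iff_eq]

theorem pvBal_eq (cs : List Char) (a : Int) :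
    cs.foldl (fun d ch => if ch == '(' then d + 1 else if ch == ')' then d - 1 else d) a
      = a + (cs.map (fun c => (if c == '(' then (1 : Int) else 0) - (if c == ')' then (1 : Int) else 0))).sum := by
  induction cs generalizing a with
  | nil => simp
  | cons c cs ih =>
    simp only [List.foldl_cons, List.map_cons, List.sum_cons]
    rw [ih]
    cases h1 : (c == '(') <;> cases h2 : (c == ')') <;> simp_all <;> ring

theorem pvWv_nil_ts (ev cm : String) (ls : List String) (k : Int) : pvWv ev cm ls [] k = ls := by
  induction ls generalizing k with
  | nil => simp [pvWv]
  | cons l rest ih => simp [pvWv, ih]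

theorem pvCountP_split (ts : List Int) (k : Int) :
    ts.countP (fun t => decide (k ≤ t)) = List.count k ts + ts.countP (fun t => decide (k + 1 ≤ t)) := by
  induction ts with
  | nil => simp
  | cons t ts ih =>
    simp only [List.countP_cons, List.count_cons, ih]
    by_cases h1 : t = k
    · subst h1; simp [show ¬(t + 1 ≤ t) by omega]; omega
    · have hbk : (t == k) = false := by simp [h1]
      by_cases h2 : k ≤ t
      · have h3 : k + 1 ≤ t := by omega
        simp [hbk, h2, h3]; omega
      · simp [hbk, h2, show ¬(k + 1 ≤ t) by omega]

theorem pvWv_length (ev cm : String) (ls : List String) (ts : List Int) (k : Int)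
    (h : ∀ t ∈ ts, t < k + ls.length) :
    (pvWv ev cm ls ts k).length = ls.length + ts.countP (fun t => decide (k ≤ t)) := by
  induction ls generalizing ts k with
  | nil =>
    have hz : ts.countP (fun t => decide (k ≤ t)) = 0 :=
      List.countP_eq_zero.mpr (fun t ht => by have := h t ht; simp at this ⊢; omega)
    simp [pvWv, hz]
  | cons l rest ih =>
    have hrec : ∀ t ∈ ts, t < (k + 1) + (rest.length : Int) := by
      intro t ht; have := h t ht; simp only [List.length_cons] at this; push_cast at this ⊢; omega
    simp only [pvWv, List.length_append, List.length_replicate, List.length_cons, ih ts (k+1) hrec,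
      pvCountP_split ts k]
    omega

theorem pvWv_append_lt (ev cm : String) (ls : List String) (ts : List Int) (k e : Int) (he : e < k) :
    pvWv ev cm ls (ts ++ [e]) k = pvWv ev cm ls ts k := by
  induction ls generalizing k with
  | nil => simp [pvWv]
  | cons l rest ih =>
    have hek : List.count k [e] = 0 := List.count_eq_zero.mpr (by simp; omega)
    simp [pvWv, List.count_append, hek, ih (k+1) (by omega)]

theorem pvInsert_cons (x : String) (xs : List String) (j : Nat) (hj : j ≤ xs.length) (v : String) :
    PySem.List.insert (x :: xs) (((1 + j : Nat) : Int)) v = x :: PySem.List.insert xs ((j : Nat) : Int) v := by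
  rw [PySem.List.insert_natCast _ _ _ (by simp; omega), PySem.List.insert_natCast _ _ _ hj]
  rw [Nat.add_comm 1 j]
  simp [List.take_succ_cons]

theorem pvInsert_repl (n : Nat) (m : String) (ys : List String) (j : Nat) (hj : j ≤ ys.length) (v : String) :
    PySem.List.insert (List.replicate n m ++ ys) (((n + j : Nat) : Int)) v
      = List.replicate n m ++ PySem.List.insert ys ((j : Nat) : Int) v := by
  rw [PySem.List.insert_natCast _ _ _ (by simp [hj]), PySem.List.insert_natCast _ _ _ hj]
  rw [List.take_append, List.drop_append]
  simp [List.take_replicate, List.drop_replicate, List.append_assoc]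

theorem pvGetD_repl (n : Nat) (m : String) (ys : List String) (i j : Nat) (hij : i = n + j) :
    (List.replicate n m ++ ys).getD i "" = ys.getD j "" := by
  subst hij
  rw [List.getD_eq_getElem?_getD, List.getElem?_append_right (by simp)]
  simp [List.getD_eq_getElem?_getD]

theorem pvTgt_nonneg (ls : List String) (i : Int) (hi : 0 ≤ i) : 0 ≤ pvTgt ls i := by
  unfold pvTgt; split_ifs with h <;> omega

theorem pvTgt_le (ls : List String) (i : Int) : pvTgt ls i ≤ i := by
  unfold pvTgt; split_ifs with h <;> omega

theorem pvWv_getD (ev cm : String) (ls : List String) (ts : List Int) (k : Int) (u : Nat)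
    (hu : u < ls.length) (hts : ∀ t ∈ ts, t ≤ k + u) :
    PySem.List.pyGetD (pvWv ev cm ls ts k) (((u + ts.countP (fun t => decide (k ≤ t)) : Nat) : Int)) ""
      = ls.getD u "" := by
  induction ls generalizing ts k u with
  | nil => exact absurd hu (by simp)
  | cons l rest ih =>
    have hsplit := pvCountP_split ts k
    rw [PySem.List.pyGetD_natCast]
    cases u with
    | zero =>
      have hz : ts.countP (fun t => decide (k + 1 ≤ t)) = 0 :=
        List.countP_eq_zero.mpr (fun t ht => by have := hts t ht; simp at this ⊢; omega)
      show (pvWv ev cm (l :: rest) ts k).getD _ "" = l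
      rw [pvWv, pvGetD_repl _ _ _ _ 0 (by omega)]
      simp
    | succ u' =>
      have hu' : u' < rest.length := by simpa using hu
      have hts' : ∀ t ∈ ts, t ≤ (k + 1) + (u' : Int) := fun t ht => by
        have := hts t ht; push_cast at this ⊢; omega
      have ihh := ih ts (k + 1) u' hu' hts'
      rw [PySem.List.pyGetD_natCast] at ihh
      rw [pvWv, pvGetD_repl _ _ _ _ (u' + ts.countP (fun t => decide (k + 1 ≤ t)) + 1) (by omega)]
      rw [List.getD_cons_succ, ihh, List.getD_cons_succ]

theorem pvWv_insert (ev cm : String) (ls : List String) (ts : List Int) (k : Int) (u : Nat)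
    (hu : u < ls.length) (hts : ∀ t ∈ ts, t ≤ k + u) :
    PySem.List.insert (pvWv ev cm ls ts k) (((u + ts.countP (fun t => decide (k ≤ t)) : Nat) : Int))
        (pvMk ev cm (ls.getD u ""))
      = pvWv ev cm ls (ts ++ [k + u]) k := by
  induction ls generalizing ts k u with
  | nil => exact absurd hu (by simp)
  | cons l rest ih =>
    have hsplit := pvCountP_split ts k
    cases u with
    | zero =>
      have hz : ts.countP (fun t => decide (k + 1 ≤ t)) = 0 :=
        List.countP_eq_zero.mpr (fun t ht => by have := hts t ht; simp at this ⊢; omega)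
      simp only [Nat.cast_zero, add_zero, List.getD_cons_zero]
      rw [pvWv, show (0 + ts.countP (fun t => decide (k ≤ t))) = List.count k ts + 0 by omega]
      rw [pvInsert_repl _ _ _ _ (by simp), Nat.cast_zero, PySem.List.insert_zero]
      rw [pvWv, pvWv_append_lt ev cm rest ts (k + 1) k (by omega)]
      have hcnt : List.count k (ts ++ [k]) = List.count k ts + 1 := by
        simp [List.count_append]
      rw [hcnt]
      simp [List.replicate_succ', List.append_assoc]
    | succ u' =>
      have hu' : u' < rest.length := by simpa using hu
      have hts' : ∀ t ∈ ts, t ≤ (k + 1) + (u' : Int) := fun t ht => by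
        have := hts t ht; push_cast at this ⊢; omega
      have hlen : (pvWv ev cm rest ts (k + 1)).length
          = rest.length + ts.countP (fun t => decide (k + 1 ≤ t)) :=
        pvWv_length ev cm rest ts (k + 1)
          (fun t ht => by have := hts t ht; push_cast at this ⊢; omega)
      have hb1 : u' + ts.countP (fun t => decide (k + 1 ≤ t)) ≤ (pvWv ev cm rest ts (k + 1)).length := by
        rw [hlen]; omega
      have ihh := ih ts (k + 1) u' hu' hts'
      rw [pvWv, show (u' + 1 + ts.countP (fun t => decide (k ≤ t)))
            = List.count k ts + (1 + (u' + ts.countP (fun t => decide (k + 1 ≤ t)))) by omega]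
      rw [pvInsert_repl _ _ _ _ (by simp only [List.length_cons]; omega),
        pvInsert_cons _ _ _ hb1]
      rw [List.getD_cons_succ, ihh]
      rw [show k + ((u' + 1 : Nat) : Int) = (k + 1) + (u' : Int) by push_cast; ring]
      have hcnt : List.count k (ts ++ [(k + 1) + (u' : Int)]) = List.count k ts := by
        have hz2 : List.count k [(k + 1) + (u' : Int)] = 0 :=
          List.count_eq_zero.mpr (by simp; omega)
        simp [List.count_append, hz2]
      conv_rhs => rw [pvWv]
      rw [hcnt]

-- one iteration of A's insertion loop, on a state described by pvWv
theorem pvStepA (ev cm : String) (ls : List String) (ts : List Int) (c : Nat) (hc : c < ls.length)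
    (h0 : ∀ t ∈ ts, 0 ≤ t) (hub : ∀ t ∈ ts, t + 1 ≤ (c : Int)) :
    pvFoldA ev cm (pvWv ev cm ls ts 0, (ts.length : Int)) ((c : Nat) : Int)
      = (pvWv ev cm ls (ts ++ [pvTgt ls ((c : Nat) : Int)]) 0, (ts.length : Int) + 1) := by
  have hcnt : ts.countP (fun t => decide ((0 : Int) ≤ t)) = ts.length :=
    List.countP_eq_length.mpr (fun t ht => by simpa using h0 t ht)
  unfold pvFoldA
  by_cases hc0 : c = 0
  · subst hc0
    have hts : ts = [] := by
      cases ts with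
      | nil => rfl
      | cons a l =>
        have h1 := h0 a (by simp)
        have h2 := hub a (by simp)
        omega
    subst hts
    have hget := pvWv_getD ev cm ls [] 0 0 hc (by simp)
    have hins := pvWv_insert ev cm ls [] 0 0 hc (by simp)
    simp only [List.countP_nil, Nat.add_zero, Nat.cast_zero, zero_add] at hget hins
    simp only [pvMk] at hins
    have htgt : pvTgt ls 0 = 0 := by unfold pvTgt; simp
    simp only [List.length_nil, Nat.cast_zero, add_zero, Nat.cast_zero]
    rw [if_neg (by norm_num)]
    rw [hget, hins, htgt]
  · have hc1 : 1 ≤ c := Nat.one_le_iff_ne_zero.mpr hc0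
    have hgprev : PySem.List.pyGetD (pvWv ev cm ls ts 0) ((c : Int) + (ts.length : Int) - 1) ""
        = ls.getD (c - 1) "" := by
      have h := pvWv_getD ev cm ls ts 0 (c - 1) (by omega)
        (fun t ht => by have := hub t ht; push_cast at this ⊢; omega)
      rw [hcnt] at h
      rw [show ((c : Int) + (ts.length : Int) - 1) = (((c - 1) + ts.length : Nat) : Int) by
        push_cast; omega]
      exact h
    have htgt : pvTgt ls ((c : Nat) : Int) = if 0 < pvBalB (ls.getD (c - 1) "") then (((c - 1 : Nat)) : Int) else (c : Int) := by
      unfold pvTgt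
      rw [show ((c : Int) - 1) = (((c - 1 : Nat)) : Int) by push_cast; omega,
        PySem.List.pyGetD_natCast]
      simp only [show (0 : Int) < ((c : Nat) : Int) from by push_cast; omega, true_and]
    dsimp only
    rw [if_pos (by push_cast; omega)]
    rw [hgprev, pvBal_eq]
    simp only [zero_add]
    by_cases hb : 0 < pvBalB (ls.getD (c - 1) "")
    · rw [if_pos (by simpa [pvBalB] using hb)]
      have hins := pvWv_insert ev cm ls ts 0 (c - 1) (by omega)
        (fun t ht => by have := hub t ht; push_cast at this ⊢; omega)
      rw [hcnt] at hins
      simp only [pvMk, zero_add] at hins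
      rw [hgprev]
      rw [show ((c : Int) + (ts.length : Int) - 1) = (((c - 1) + ts.length : Nat) : Int) by
        push_cast; omega]
      rw [hins, htgt, if_pos hb]
    · rw [if_neg (by simpa [pvBalB] using hb)]
      have hins := pvWv_insert ev cm ls ts 0 c hc
        (fun t ht => by have := hub t ht; push_cast at this ⊢; omega)
      rw [hcnt] at hins
      simp only [pvMk, zero_add] at hins
      have hgc : PySem.List.pyGetD (pvWv ev cm ls ts 0) ((c : Int) + (ts.length : Int)) ""
          = ls.getD c "" := by
        have h := pvWv_getD ev cm ls ts 0 c hc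
          (fun t ht => by have := hub t ht; push_cast at this ⊢; omega)
        rw [hcnt] at h
        rw [show ((c : Int) + (ts.length : Int)) = ((c + ts.length : Nat) : Int) by push_cast; omega]
        exact h
      rw [hgc]
      rw [show ((c : Int) + (ts.length : Int)) = ((c + ts.length : Nat) : Int) by push_cast; omega]
      rw [hins, htgt, if_neg hb]

-- A's whole loop over the recorded hit pairs
theorem pvLoopA (ev cm : String) (ls : List String) (H : List (Int × String)) (ts : List Int)
    (hmem : ∀ p ∈ H, ∃ k : Nat, ∃ _ : k < ls.length, p.1 = (k : Int))
    (hinc : H.Pairwise (fun p q => p.1 < q.1))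
    (h0 : ∀ t ∈ ts, 0 ≤ t) (hub : ∀ p ∈ H, ∀ t ∈ ts, t + 1 ≤ p.1) :
    (H.map (·.1)).foldl (pvFoldA ev cm) (pvWv ev cm ls ts 0, (ts.length : Int))
      = (pvWv ev cm ls (ts ++ H.map (fun p => pvTgt ls p.1)) 0, (ts.length : Int) + H.length) := by
  induction H generalizing ts with
  | nil => simp
  | cons p rest ih =>
    obtain ⟨k, hk, hp1⟩ := hmem p (List.mem_cons_self)
    have hpair := List.pairwise_cons.mp hinc
    simp only [List.map_cons, List.foldl_cons, List.length_cons]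
    rw [hp1]
    rw [pvStepA ev cm ls ts k hk h0
      (fun t ht => by rw [← hp1]; exact hub p (List.mem_cons_self) t ht)]
    have hlen : ((ts ++ [pvTgt ls ((k : Nat) : Int)]).length : Int) = (ts.length : Int) + 1 := by
      simp
    rw [← hlen]
    rw [ih (ts ++ [pvTgt ls ((k : Nat) : Int)])
      (fun q hq => hmem q (List.mem_cons_of_mem _ hq))
      hpair.2
      (by
        intro t ht
        rcases List.mem_append.mp ht with h | h
        · exact h0 t h
        · simp only [List.mem_singleton] at h; subst h
          exact pvTgt_nonneg ls _ (by positivity))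
      (by
        intro q hq t ht
        rcases List.mem_append.mp ht with h | h
        · exact hub q (List.mem_cons_of_mem _ hq) t h
        · simp only [List.mem_singleton] at h; subst h
          have h1 : pvTgt ls ((k : Nat) : Int) ≤ ((k : Nat) : Int) := pvTgt_le ls _
          have h2 : p.1 < q.1 := hpair.1 q hq
          rw [hp1] at h2
          omega)]
    refine Prod.ext ?_ ?_
    · simp only [List.append_assoc, List.map_cons, hp1]
      rfl
    · simp only [List.length_append, List.length_cons, List.length_nil, List.length_singleton]
      push_cast
      ring

-- B's second pass builds exactly the weave
theorem pvLoopB (ev cm : String) (ls : List String) (targets : List Int) (k : Int) (out : List String) :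
    (PySem.List.enumerate ls k).foldl (pvFoldB ev cm targets) out = out ++ pvWv ev cm ls targets k := by
  induction ls generalizing k out with
  | nil => simp [PySem.List.enumerate_nil, pvWv]
  | cons l rest ih =>
    rw [PySem.List.enumerate_cons]
    simp only [List.foldl_cons]
    have hstep : pvFoldB ev cm targets out (k, l)
        = (if PySem.List.count targets k ≠ 0 then
            out ++ List.replicate (PySem.List.count targets k) (pvMk ev cm l)
          else out) ++ [l] := rfl
    rw [hstep]
    have hout : (if PySem.List.count targets k ≠ 0 then
          out ++ List.replicate (PySem.List.count targets k) (pvMk ev cm l)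
        else out) = out ++ List.replicate (PySem.List.count targets k) (pvMk ev cm l) := by
      split_ifs with h
      · rfl
      · have h0 := not_not.mp h
        rw [h0]
        simp
    rw [hout, ih]
    rw [pvWv, PySem.List.count_eq]
    simp [List.append_assoc]

-- ===== VERDICT (by name: the statement is the Claim_ definition above) =====
theorem insert_errno_before_call_spec : Claim_equal_insert_errno_before_call := by
  intro lines fcp ev cm hdom hpre
  unfold Spec_insert_errno_before_call
  show insert_errno_before_call lines fcp ev cm = insert_errno_before_call_alt lines fcp ev cm
  simp only [insert_errno_before_call, insert_errno_before_call_alt]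
  rw [PySem.List.foldl_append_if (fun p : Int × String => pvHitA fcp p.2) (fun p => p.1)
    (PySem.List.enumerate lines 0) []]
  rw [PySem.List.foldl_append_if (fun p : Int × String => pvHitB fcp p.2)
    (fun p => if 0 < p.1 ∧ 0 < pvBalB (PySem.List.pyGetD lines (p.1 - 1) "") then p.1 - 1 else p.1)
    (PySem.List.enumerate lines 0) []]
  have hfilters : (fun p : Int × String => pvHitB fcp p.2) = (fun p => pvHitA fcp p.2) :=
    funext (fun p => (pvHit_eq fcp p.2).symm)
  rw [hfilters]
  have hf2 : (fun p : Int × String =>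
      if 0 < p.1 ∧ 0 < pvBalB (PySem.List.pyGetD lines (p.1 - 1) "") then p.1 - 1 else p.1)
      = (fun p => pvTgt lines p.1) := rfl
  rw [hf2]
  have hmem : ∀ p ∈ (PySem.List.enumerate lines 0).filter (fun p => pvHitA fcp p.2),
      ∃ k : Nat, ∃ _ : k < lines.length, p.1 = (k : Int) := by
    intro p hp
    have hpe := (List.mem_filter.mp hp).1
    rw [PySem.List.mem_enumerate_iff] at hpe
    obtain ⟨k, hk, heq⟩ := hpe
    exact ⟨k, hk, by rw [heq]; simp⟩
  have hinc : ((PySem.List.enumerate lines 0).filter (fun p => pvHitA fcp p.2)).Pairwise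
      (fun p q => p.1 < q.1) :=
    (PySem.List.pairwise_lt_enumerate lines 0).filter _
  have hA := pvLoopA ev cm lines
    ((PySem.List.enumerate lines 0).filter (fun p => pvHitA fcp p.2)) []
    hmem hinc (by simp) (by simp)
  rw [pvWv_nil_ts] at hA
  simp only [List.nil_append, List.length_nil, Nat.cast_zero, zero_add] at hA
  simp only [List.nil_append]
  rw [hA]
  rw [pvLoopB ev cm lines _ 0 []]
  simp
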